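-- pv_equiv track=rewrite | github.com/wooolwooolwoool/bitbacktest | app/build_lambda_src.py | get_all_superclasses
-- ===== SOURCE A (Python) =====
-- def get_all_superclasses(class_hierarchy, target_classes):
--     """Get all superclasses for the target classes."""
--     superclasses = set()
--
--     def add_superclasses(class_name):
--         if class_name in class_hierarchy:
--             for base_class in class_hierarchy[class_name]:
--                 if base_class not in target_classes and base_class not in superclasses:
--                     superclasses.add(base_class)
--                     add_superclasses(base_class)
--
--     for class_name in target_classes:
--         add_superclasses(class_name)
--
--     return superclasses
-- ===== SOURCE B (Python) =====
-- def get_all_superclasses(class_hierarchy, target_classes):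
--     """Get all superclasses for the target classes (iterative, explicit frame stack)."""
--     superclasses = set()
--     work = [class_hierarchy[t] for t in target_classes if t in class_hierarchy]
--     while work:
--         frame = work.pop(0)
--         if not frame:
--             continue
--         base, rest = frame[0], frame[1:]
--         if base not in target_classes and base not in superclasses:
--             superclasses.add(base)
--             work[:0] = [class_hierarchy.get(base, []), rest]
--         else:
--             work.insert(0, rest)
--     return superclasses
-- ===== Notes on version B (the rewrite author's own statement) =====
-- stated objective: alternative
-- what changed: A's nested recursive DFS (inner function add_superclasses recursing on each newly discovered base) is replaced by an iterative loop over an explicit stack of base-list frames, adding each new base when its frame is expanded; no recursion remains.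
import Mathlib
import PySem

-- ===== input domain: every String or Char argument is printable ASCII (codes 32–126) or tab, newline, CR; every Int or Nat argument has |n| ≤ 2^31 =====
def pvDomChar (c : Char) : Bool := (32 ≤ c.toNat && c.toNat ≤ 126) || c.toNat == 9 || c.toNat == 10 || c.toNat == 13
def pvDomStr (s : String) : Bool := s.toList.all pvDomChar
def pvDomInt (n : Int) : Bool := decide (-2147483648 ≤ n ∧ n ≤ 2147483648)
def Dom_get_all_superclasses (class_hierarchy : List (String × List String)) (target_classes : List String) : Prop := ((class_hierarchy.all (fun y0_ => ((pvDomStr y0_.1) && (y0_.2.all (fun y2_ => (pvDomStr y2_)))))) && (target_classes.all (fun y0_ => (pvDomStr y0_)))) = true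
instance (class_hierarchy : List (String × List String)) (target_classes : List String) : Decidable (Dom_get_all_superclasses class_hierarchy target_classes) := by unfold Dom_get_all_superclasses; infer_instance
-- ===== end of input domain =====

-- B rewrites A's nested recursive DFS as an iterative loop over an explicit stack of
-- base-list frames; same return value (a set), no side effects. Objective: alternative decomposition.

-- first-match association-list lookup (Python dict indexing on the List-encoded dict)
def pvLookup (h : List (String × List String)) (name : String) : Option (List String) :=
  match h with
  | [] => none
  | (k, v) :: rest => if k = name then some v else pvLookup rest name

-- all strings occurring in base lists of h (only these can ever be added to the set);
-- used solely in the termination measures of the two ports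
def pvV (h : List (String × List String)) : Finset String :=
  ((h.map Prod.snd).flatten).toFinset

theorem pvLookup_subset (h : List (String × List String)) (name : String) :
    ∀ x ∈ (pvLookup h name).getD [], x ∈ pvV h := by
  induction h with
  | nil => intro x hx; exact absurd hx (List.not_mem_nil)
  | cons p rest ih =>
    intro x hx
    unfold pvLookup at hx
    unfold pvV
    rw [List.mem_toFinset, List.map_cons, List.flatten_cons, List.mem_append]
    by_cases hk : p.1 = name
    · rw [if_pos hk] at hx
      exact Or.inl hx
    · rw [if_neg hk] at hx
      have := ih x hx
      unfold pvV at this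
      rw [List.mem_toFinset] at this
      exact Or.inr this

theorem pv_card_lt {A B : Finset String} (hsub : A ⊆ B) {x : String} (hxB : x ∈ B)
    (hxA : x ∉ A) : A.card < B.card :=
  Finset.card_lt_card ⟨hsub, fun hBA => hxA (hBA hxB)⟩

theorem pv_mem_add_self (s : PySem.Set String) (b : String) : b ∈ PySem.Set.add s b :=
  (PySem.Set.mem_add s b b).mpr (Or.inr rfl)

theorem pv_subset_add (s : PySem.Set String) (b : String) : s ⊆ PySem.Set.add s b :=
  fun x hx => (PySem.Set.mem_add s b x).mpr (Or.inl hx)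

-- termination lemma: entering a newly discovered base strictly shrinks the unvisited part
theorem pvDecEnter (h : List (String × List String)) (b : String) (bs extra : List String)
    (s s' : PySem.Set String) (hbs : b ∉ s) (hbs' : b ∈ s') (hss' : s ⊆ s')
    (hextra : ∀ x ∈ extra, x ∈ pvV h ∨ x ∈ bs) :
    ((pvV h ∪ extra.toFinset) \ s'.toFinset).card
      < ((pvV h ∪ (b :: bs).toFinset) \ s.toFinset).card := by
  apply pv_card_lt (x := b)
  · intro x hx
    rw [Finset.mem_sdiff, Finset.mem_union, List.mem_toFinset, List.mem_toFinset] at hx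
    rw [Finset.mem_sdiff, Finset.mem_union, List.mem_toFinset, List.mem_toFinset]
    refine ⟨?_, fun hmem => hx.2 (hss' hmem)⟩
    rcases hx.1 with hv | he
    · exact Or.inl hv
    · rcases hextra x he with hv | hb
      · exact Or.inl hv
      · exact Or.inr (List.mem_cons_of_mem b hb)
  · rw [Finset.mem_sdiff, Finset.mem_union, List.mem_toFinset, List.mem_toFinset]
    exact ⟨Or.inr (List.mem_cons_self), hbs⟩
  · rw [Finset.mem_sdiff, List.mem_toFinset]
    exact fun hc => hc.2 hbs'

-- termination lemma: skipping the head of a frame never grows the unvisited part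
theorem pvDecSkip (h : List (String × List String)) (b : String) (bs : List String)
    (s : PySem.Set String) :
    ((pvV h ∪ bs.toFinset) \ s.toFinset).card
      ≤ ((pvV h ∪ (b :: bs).toFinset) \ s.toFinset).card := by
  apply Finset.card_le_card
  intro x hx
  rw [Finset.mem_sdiff, Finset.mem_union, List.mem_toFinset, List.mem_toFinset] at hx
  rw [Finset.mem_sdiff, Finset.mem_union, List.mem_toFinset, List.mem_toFinset]
  exact ⟨hx.1.imp id (List.mem_cons_of_mem b), hx.2⟩

theorem pv_lex_of_le {α : Type} {r : α → α → Prop} {a b : Nat} {c d : α}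
    (hle : a ≤ b) (hcd : r c d) : Prod.Lex (· < ·) r (a, c) (b, d) := by
  rcases Nat.lt_or_ge a b with hlt | hge
  · exact Prod.Lex.left _ _ hlt
  · have hab : a = b := Nat.le_antisymm hle hge
    subst hab
    exact Prod.Lex.right _ hcd

-- ===== PORT A =====
-- A's recursive DFS: goA is the body of add_superclasses — the 'for base_class in
-- class_hierarchy[class_name]' loop over a base list bs with set state s; the recursive
-- call add_superclasses(base_class) is goA on (pvLookup h b).getD [] (a missing key means
-- the 'if class_name in class_hierarchy' guard fails, i.e. an empty loop — exact).
-- The returned subtype proof (the set only grows) is needed for termination only.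
def goA (h : List (String × List String)) (t : List String) :
    (bs : List String) → (s : PySem.Set String) → {r : PySem.Set String // s ⊆ r}
  | [], s => ⟨s, fun _ hx => hx⟩
  | b :: bs, s =>
    if hb : b ∉ t ∧ b ∉ s then
      let r1 := goA h t ((pvLookup h b).getD []) (PySem.Set.add s b)
      let r2 := goA h t bs r1.1
      ⟨r2.1, fun x hx => r2.2 (r1.2 (pv_subset_add s b hx))⟩
    else
      let r := goA h t bs s
      ⟨r.1, r.2⟩
  termination_by bs s => (((pvV h ∪ bs.toFinset) \ s.toFinset).card, bs.length)
  decreasing_by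
  · exact Prod.Lex.left _ _ (pvDecEnter h b bs _ s _ hb.2 (pv_mem_add_self s b)
      (pv_subset_add s b) (fun x hx => Or.inl (pvLookup_subset h b x hx)))
  · exact Prod.Lex.left _ _ (pvDecEnter h b bs bs s _ hb.2
      (r1.2 (pv_mem_add_self s b)) (fun _ hx => r1.2 (pv_subset_add s b hx))
      (fun _ hx => Or.inr hx))
  · exact pv_lex_of_le (pvDecSkip h b bs s) (Nat.lt_succ_self _)

-- add_superclasses(name): look the class up, run the loop over its bases (absent key = no loop)
def addSuperA (h : List (String × List String)) (t : List String) (name : String)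
    (s : PySem.Set String) : PySem.Set String :=
  (goA h t ((pvLookup h name).getD []) s).1

def get_all_superclasses (class_hierarchy : List (String × List String)) (target_classes : List String) : List String :=
  target_classes.foldl (fun s name => addSuperA class_hierarchy target_classes name s) PySem.Set.empty

-- ===== PORT B =====
-- termination lemma for B's loop (stated over the frame stack)
theorem pvDecEnterB (h : List (String × List String)) (b : String) (rest : List String)
    (fs : List (List String)) (s : PySem.Set String) (hbs : b ∉ s) :
    ((pvV h ∪ ((pvLookup h b).getD [] :: rest :: fs).flatten.toFinset) \ (PySem.Set.add s b).toFinset).card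
      < ((pvV h ∪ ((b :: rest) :: fs).flatten.toFinset) \ s.toFinset).card := by
  have h1 : ((pvLookup h b).getD [] :: rest :: fs).flatten
      = (pvLookup h b).getD [] ++ (rest ++ fs.flatten) := by
    rw [List.flatten_cons, List.flatten_cons]
  have h2 : ((b :: rest) :: fs).flatten = b :: (rest ++ fs.flatten) := by
    rw [List.flatten_cons, List.cons_append]
  rw [h1, h2]
  exact pvDecEnter h b (rest ++ fs.flatten) ((pvLookup h b).getD [] ++ (rest ++ fs.flatten))
    s (PySem.Set.add s b) hbs (pv_mem_add_self s b) (pv_subset_add s b)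
    (fun x hx => (List.mem_append.mp hx).imp (pvLookup_subset h b x) id)

theorem pvDecSkipB (h : List (String × List String)) (b : String) (rest : List String)
    (fs : List (List String)) (s : PySem.Set String) :
    ((pvV h ∪ ((rest :: fs).flatten).toFinset) \ s.toFinset).card
      ≤ ((pvV h ∪ (((b :: rest) :: fs).flatten).toFinset) \ s.toFinset).card := by
  rw [List.flatten_cons, List.flatten_cons, List.cons_append]
  exact pvDecSkip h b (rest ++ fs.flatten) s

-- B's iterative loop: work is the list of pending base-list frames, popped at the front.
def stepB (h : List (String × List String)) (t : List String) :
    (work : List (List String)) → (s : PySem.Set String) → PySem.Set String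
  | [], s => s
  | [] :: fs, s => stepB h t fs s
  | (b :: rest) :: fs, s =>
    if hb : b ∉ t ∧ b ∉ s then
      stepB h t ((pvLookup h b).getD [] :: rest :: fs) (PySem.Set.add s b)
    else
      stepB h t (rest :: fs) s
  termination_by work s =>
    (((pvV h ∪ work.flatten.toFinset) \ s.toFinset).card,
     (work.map List.length).sum, work.length)
  decreasing_by
  · refine pv_lex_of_le (le_of_eq ?_) (pv_lex_of_le (le_of_eq ?_) (Nat.lt_succ_self _))
    · rw [List.flatten_cons, List.nil_append]
    · rw [List.map_cons, List.sum_cons, List.length_nil, Nat.zero_add]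
  · exact Prod.Lex.left _ _ (pvDecEnterB h b rest fs s hb.2)
  · refine pv_lex_of_le (pvDecSkipB h b rest fs s) (Prod.Lex.left _ _ ?_)
    rw [List.map_cons, List.map_cons, List.sum_cons, List.sum_cons, List.length_cons]
    exact Nat.add_lt_add_right (Nat.lt_succ_self _) _

def get_all_superclasses_alt (class_hierarchy : List (String × List String)) (target_classes : List String) : List String :=
  stepB class_hierarchy target_classes
    (target_classes.filterMap (fun t => pvLookup class_hierarchy t)) PySem.Set.empty

-- ===== PRECONDITION & SPEC =====
def Spec_get_all_superclasses (class_hierarchy : List (String × List String)) (target_classes : List String) (out : List String) : Prop := out = get_all_superclasses_alt class_hierarchy target_classes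
instance (class_hierarchy : List (String × List String)) (target_classes : List String) (out : List String) : Decidable (Spec_get_all_superclasses class_hierarchy target_classes out) := by unfold Spec_get_all_superclasses; infer_instance

-- ===== CLAIM (what is proved, stated in full; the proofs are below) =====
def Claim_equal_get_all_superclasses : Prop := ∀ (class_hierarchy : List (String × List String)) (target_classes : List String), Dom_get_all_superclasses class_hierarchy target_classes → Spec_get_all_superclasses class_hierarchy target_classes (get_all_superclasses class_hierarchy target_classes)

-- ===== LEMMAS AND PROOFS =====

-- pushing a frame on the work list and running B equals running A's loop on that frame first
theorem stepB_cons (h : List (String × List String)) (t : List String)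
    (bs : List String) (s : PySem.Set String) :
    ∀ fs, stepB h t (bs :: fs) s = stepB h t fs (goA h t bs s).1 := by
  induction bs, s using goA.induct h t with
  | case1 s => intro fs; rw [stepB, goA]
  | case2 b bs s hb x1 ih1 ih2 ih3 =>
    intro fs
    rw [stepB, goA]
    simp only [dif_pos hb]
    rw [ih1]
    exact ih3 fs
  | case3 b bs s hb ih =>
    intro fs
    rw [stepB, goA]
    simp only [dif_neg hb]
    exact ih fs

theorem stepB_foldl (h : List (String × List String)) (t : List String) :
    ∀ (ts : List String) (s : PySem.Set String),
      stepB h t (ts.filterMap (fun n => pvLookup h n)) s =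
        ts.foldl (fun s name => addSuperA h t name s) s := by
  intro ts
  induction ts with
  | nil => intro s; simp [stepB]
  | cons n ts ih =>
    intro s
    simp only [List.filterMap_cons, List.foldl_cons]
    cases hl : pvLookup h n with
    | none =>
      rw [ih]
      have hs : addSuperA h t n s = s := by
        unfold addSuperA; rw [hl]
        simp [goA]
      rw [hs]
    | some bs =>
      rw [stepB_cons, ih]
      unfold addSuperA
      rw [hl]
      simp

-- ===== VERDICT (by name: the statement is the Claim_ definition above) =====
theorem get_all_superclasses_spec : Claim_equal_get_all_superclasses := by
  intro h t _
  unfold Spec_get_all_superclasses get_all_superclasses get_all_superclasses_alt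
  rw [stepB_foldl]
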